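-- pv_equiv track=rewrite | github.com/Koriginal/uniai-kernel | backend/app/agents/nodes/agent.py | _has_tool_result_after_latest_user
-- ===== SOURCE A (Python) =====
-- def _has_tool_result_after_latest_user(messages: list, tool_name: str) -> bool:
--     if not messages:
--         return False
--     last_user_index = -1
--     for idx in range(len(messages) - 1, -1, -1):
--         if messages[idx].get("role") == "user":
--             last_user_index = idx
--             break
--     if last_user_index < 0:
--         return False
--     for msg in messages[last_user_index + 1:]:
--         if msg.get("role") == "tool" and msg.get("name") == tool_name:
--             return True
--     return False
-- ===== SOURCE B (Python) =====
-- def _has_tool_result_after_latest_user(messages: list, tool_name: str) -> bool: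
--     seen_user = False
--     found = False
--     for msg in messages:
--         if msg.get("role") == "user":
--             seen_user = True
--             found = False
--         elif seen_user and msg.get("role") == "tool" and msg.get("name") == tool_name:
--             found = True
--     return found
-- ===== Notes on version B (the rewrite author's own statement) =====
-- stated objective: simpler
-- what changed: Replaced A's backward index scan for the latest user message followed by a second forward scan of the slice after it with a single forward pass over the messages that carries two booleans (seen_user, found), resetting found at each user message.
import Mathlib
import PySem

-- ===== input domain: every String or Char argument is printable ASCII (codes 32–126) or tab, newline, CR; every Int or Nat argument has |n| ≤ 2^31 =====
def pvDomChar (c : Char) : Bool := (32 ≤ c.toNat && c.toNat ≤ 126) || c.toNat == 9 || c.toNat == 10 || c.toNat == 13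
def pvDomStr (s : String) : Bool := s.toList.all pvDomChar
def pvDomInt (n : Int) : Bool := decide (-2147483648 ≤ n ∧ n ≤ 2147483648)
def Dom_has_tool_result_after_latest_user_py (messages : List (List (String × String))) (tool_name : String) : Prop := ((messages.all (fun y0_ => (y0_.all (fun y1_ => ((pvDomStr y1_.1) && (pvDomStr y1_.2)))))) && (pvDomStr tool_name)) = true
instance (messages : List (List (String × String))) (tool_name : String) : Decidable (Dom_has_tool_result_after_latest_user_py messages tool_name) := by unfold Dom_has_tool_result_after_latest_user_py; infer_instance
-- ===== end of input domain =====

-- B replaces A's backward index scan for the last user plus a second forward scan of the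
-- slice after it by a single forward pass carrying two booleans (simpler, one pass, no indexing).
-- Return value only; neither program mutates its arguments.

-- msg.get(k) on a dict ported as an association list: first match, None if absent (shared by both ports)
def pvGet (m : List (String × String)) (k : String) : Option String :=
  (PySem.Dict.mk m).get? k

-- ===== PORT A =====
-- the backward 'for idx in range(len(messages)-1, -1, -1): … break' loop, over the index list
def pvAFindLast (messages : List (List (String × String))) : List Int → Int
  | [] => -1
  | i :: rest =>
      if ((PySem.List.pyGet? messages i).bind (fun m => pvGet m "role")) == some "user" then i
      else pvAFindLast messages rest

-- the forward 'for msg in messages[last_user_index+1:]: … return True' loop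
def pvAAny (tool_name : String) : List (List (String × String)) → Bool
  | [] => false
  | m :: rest =>
      if (pvGet m "role" == some "tool") && (pvGet m "name" == some tool_name) then true else pvAAny tool_name rest

def has_tool_result_after_latest_user_py (messages : List (List (String × String))) (tool_name : String) : Bool :=
  if messages.isEmpty then false
  else
    let lastUserIndex := pvAFindLast messages (PySem.List.pyRange ((PySem.List.len messages) - 1) (-1) (-1))
    if lastUserIndex < 0 then false
    else pvAAny tool_name (PySem.List.slice messages (some (lastUserIndex + 1)) none)

-- ===== PORT B =====
-- one forward pass: state (seen_user, found)
def pvBStep (tool_name : String) (s : Bool × Bool) (m : List (String × String)) : Bool × Bool :=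
  if pvGet m "role" == some "user" then (true, false)
  else if s.1 && (pvGet m "role" == some "tool") && (pvGet m "name" == some tool_name) then (s.1, true)
  else s

def has_tool_result_after_latest_user_py_alt (messages : List (List (String × String))) (tool_name : String) : Bool :=
  (messages.foldl (pvBStep tool_name) (false, false)).2

-- ===== PRECONDITION & SPEC =====
def Spec_has_tool_result_after_latest_user_py (messages : List (List (String × String))) (tool_name : String) (out : Bool) : Prop := out = has_tool_result_after_latest_user_py_alt messages tool_name
instance (messages : List (List (String × String))) (tool_name : String) (out : Bool) : Decidable (Spec_has_tool_result_after_latest_user_py messages tool_name out) := by unfold Spec_has_tool_result_after_latest_user_py; infer_instance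

-- ===== CLAIM (what is proved, stated in full; the proofs are below) =====
def Claim_equal_has_tool_result_after_latest_user_py : Prop := ∀ (messages : List (List (String × String))) (tool_name : String), Dom_has_tool_result_after_latest_user_py messages tool_name → Spec_has_tool_result_after_latest_user_py messages tool_name (has_tool_result_after_latest_user_py messages tool_name)

-- ===== LEMMAS AND PROOFS =====

def pvIsUser (m : List (String × String)) : Bool := pvGet m "role" == some "user"

def pvTM (tool_name : String) (m : List (String × String)) : Bool :=
  (pvGet m "role" == some "tool") && (pvGet m "name" == some tool_name)

def pvUserAt (ms : List (List (String × String))) (i : Int) : Bool :=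
  ((PySem.List.pyGet? ms i).bind (fun m => pvGet m "role")) == some "user"

theorem pvFindLast_eq (ms ms' : List (List (String × String))) (idxs : List Int)
    (h : ∀ i ∈ idxs, PySem.List.pyGet? ms' i = PySem.List.pyGet? ms i) :
    pvAFindLast ms' idxs = pvAFindLast ms idxs := by
  induction idxs with
  | nil => rfl
  | cons i rest ih =>
    simp only [pvAFindLast, h i List.mem_cons_self]
    split
    · rfl
    · exact ih fun j hj => h j (List.mem_cons_of_mem i hj)

theorem pvFindLast_mem (ms : List (List (String × String))) (idxs : List Int) :
    pvAFindLast ms idxs = -1 ∨ pvAFindLast ms idxs ∈ idxs := by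
  induction idxs with
  | nil => left; rfl
  | cons i rest ih =>
    simp only [pvAFindLast]
    split
    · right; exact List.mem_cons_self
    · rcases ih with h | h
      · left; exact h
      · right; exact List.mem_cons_of_mem i h

theorem pvFindLast_nonneg_iff (ms : List (List (String × String))) (idxs : List Int)
    (h0 : ∀ i ∈ idxs, 0 ≤ i) :
    0 ≤ pvAFindLast ms idxs ↔ ∃ i ∈ idxs, pvUserAt ms i = true := by
  induction idxs with
  | nil => simp [pvAFindLast]
  | cons i rest ih =>
    simp only [pvAFindLast]
    by_cases hu : (((PySem.List.pyGet? ms i).bind (fun m => pvGet m "role")) == some "user") = true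
    · rw [if_pos hu]
      constructor
      · intro _; exact ⟨i, List.mem_cons_self, hu⟩
      · intro _; exact h0 i List.mem_cons_self
    · rw [if_neg hu, ih (fun j hj => h0 j (List.mem_cons_of_mem i hj))]
      constructor
      · rintro ⟨j, hj, hju⟩; exact ⟨j, List.mem_cons_of_mem i hj, hju⟩
      · rintro ⟨j, hj, hju⟩
        rcases List.mem_cons.mp hj with rfl | hj'
        · exact absurd hju hu
        · exact ⟨j, hj', hju⟩

theorem pvExists_iff_any (ms : List (List (String × String))) :
    (∃ i ∈ PySem.List.pyRange ((ms.length : Int) - 1) (-1) (-1), pvUserAt ms i = true)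
      ↔ ms.any pvIsUser = true := by
  constructor
  · rintro ⟨i, hmem, hu⟩
    rw [PySem.List.mem_pyRange_neg_one] at hmem
    have h1 : (0:Int) ≤ i := by omega
    have h2 : i.toNat < ms.length := by omega
    rw [pvUserAt, PySem.List.pyGet?_of_nonneg ms h1, List.getElem?_eq_getElem h2] at hu
    refine List.any_eq_true.mpr ⟨ms[i.toNat], List.getElem_mem _, hu⟩
  · intro h
    rcases List.any_eq_true.mp h with ⟨x, hx, hux⟩
    rcases List.mem_iff_getElem.mp hx with ⟨k, hk, rfl⟩
    refine ⟨(k : Int), ?_, ?_⟩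
    · rw [PySem.List.mem_pyRange_neg_one]; omega
    · rw [pvUserAt, PySem.List.pyGet?_natCast, List.getElem?_eq_getElem hk]
      exact hux

theorem pvAAny_append (tool_name : String) (xs : List (List (String × String)))
    (m : List (String × String)) :
    pvAAny tool_name (xs ++ [m]) = (pvAAny tool_name xs || pvTM tool_name m) := by
  induction xs with
  | nil =>
    simp only [List.nil_append, pvAAny, pvTM, Bool.false_or]
    split
    · simp_all
    · simp_all
  | cons y ys ih =>
    simp only [List.cons_append, pvAAny, ih]
    split <;> simp

-- A's value on ms, unfolded for a nonempty ms (index argument written over ms.length)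
theorem pvA_unfold (tool_name : String) (x : List (String × String))
    (xs : List (List (String × String))) :
    has_tool_result_after_latest_user_py (x :: xs) tool_name =
      (if pvAFindLast (x :: xs) (PySem.List.pyRange (((x :: xs).length : Int) - 1) (-1) (-1)) < 0
       then false
       else pvAAny tool_name (PySem.List.slice (x :: xs)
              (some (pvAFindLast (x :: xs) (PySem.List.pyRange (((x :: xs).length : Int) - 1) (-1) (-1)) + 1)) none)) := by
  simp [has_tool_result_after_latest_user_py, PySem.List.len_eq]

theorem pvMain (tool_name : String) (ms : List (List (String × String))) :
    ms.foldl (pvBStep tool_name) (false, false) =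
      (ms.any pvIsUser, has_tool_result_after_latest_user_py ms tool_name) := by
  induction ms using List.reverseRecOn with
  | nil => rfl
  | append_singleton ms m ih =>
    have hlen : PySem.List.len (ms ++ [m]) - 1 = (ms.length : Int) := by
      simp [PySem.List.len_eq]
    have hrange : PySem.List.pyRange ((ms.length : Int)) (-1) (-1)
        = (ms.length : Int) :: PySem.List.pyRange ((ms.length : Int) - 1) (-1) (-1) :=
      PySem.List.pyRange_neg_one_cons (by omega)
    have hgetm : PySem.List.pyGet? (ms ++ [m]) (ms.length : Int) = some m := by
      rw [PySem.List.pyGet?_natCast]; exact List.getElem?_concat_length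
    have hagree : ∀ i ∈ PySem.List.pyRange ((ms.length : Int) - 1) (-1) (-1),
        PySem.List.pyGet? (ms ++ [m]) i = PySem.List.pyGet? ms i := by
      intro i hi
      rw [PySem.List.mem_pyRange_neg_one] at hi
      rw [PySem.List.pyGet?_of_nonneg (ms ++ [m]) (by omega),
        PySem.List.pyGet?_of_nonneg ms (by omega)]
      exact List.getElem?_append_left (by omega)
    have h0 : ∀ i ∈ PySem.List.pyRange ((ms.length : Int) - 1) (-1) (-1), (0:Int) ≤ i := by
      intro i hi; rw [PySem.List.mem_pyRange_neg_one] at hi; omega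
    have hempty : (ms ++ [m]).isEmpty = false := by simp
    rw [List.foldl_append, ih, List.foldl_cons, List.foldl_nil]
    by_cases hu : pvIsUser m = true
    · -- the new last message is a user message: fresh latest user, nothing after it
      have hu' : (pvGet m "role" == some "user") = true := hu
      have hstep : pvBStep tool_name
          (ms.any pvIsUser, has_tool_result_after_latest_user_py ms tool_name) m = (true, false) := by
        rw [pvBStep, if_pos hu']
      have hfl : pvAFindLast (ms ++ [m])
          ((ms.length : Int) :: PySem.List.pyRange ((ms.length : Int) - 1) (-1) (-1))
          = (ms.length : Int) := by
        simp only [pvAFindLast, hgetm, Option.bind_some]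
        rw [if_pos hu']
      have hA : has_tool_result_after_latest_user_py (ms ++ [m]) tool_name = false := by
        simp only [has_tool_result_after_latest_user_py, hempty, Bool.false_eq_true, if_false,
          hlen, hrange, hfl]
        rw [if_neg (by omega), PySem.List.slice_from (ms ++ [m]) (by omega)]
        have ht : ((ms.length : Int) + 1).toNat = ms.length + 1 := by omega
        rw [ht, List.drop_eq_nil_of_le (by simp)]
        rfl
      rw [hstep, hA]
      simp [List.any_append, hu]
    · -- the new last message is not a user message: the latest user index is unchanged
      have hulit : ¬ (pvGet m "role" == some "user") = true := hu
      have hany : (ms ++ [m]).any pvIsUser = ms.any pvIsUser := by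
        simp [List.any_append, Bool.eq_false_iff.mpr hu]
      have hfl : pvAFindLast (ms ++ [m]) (PySem.List.pyRange ((ms.length : Int)) (-1) (-1))
          = pvAFindLast ms (PySem.List.pyRange ((ms.length : Int) - 1) (-1) (-1)) := by
        rw [hrange]
        simp only [pvAFindLast, hgetm, Option.bind_some]
        rw [if_neg hulit]
        exact pvFindLast_eq ms (ms ++ [m]) _ hagree
      set k := pvAFindLast ms (PySem.List.pyRange ((ms.length : Int) - 1) (-1) (-1)) with hk
      have hAapp : has_tool_result_after_latest_user_py (ms ++ [m]) tool_name
          = (has_tool_result_after_latest_user_py ms tool_name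
              || (ms.any pvIsUser && pvTM tool_name m)) := by
        by_cases hkneg : k < 0
        · -- no user message anywhere in ms (hence none in ms ++ [m] either)
          have hnoany : ms.any pvIsUser = false := by
            rw [← Bool.not_eq_true, ← pvExists_iff_any ms,
              ← pvFindLast_nonneg_iff ms _ h0, ← hk]
            omega
          have hL : has_tool_result_after_latest_user_py (ms ++ [m]) tool_name = false := by
            simp only [has_tool_result_after_latest_user_py, hempty, Bool.false_eq_true, if_false,
              hlen, hfl]
            rw [if_pos hkneg]
          have hAms : has_tool_result_after_latest_user_py ms tool_name = false := by
            rcases ms with _ | ⟨x, xs⟩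
            · rfl
            · rw [pvA_unfold, if_pos (hk ▸ hkneg)]
          rw [hL, hAms, hnoany]
          rfl
        · -- ms has a user message; its latest index k is shared by ms and ms ++ [m]
          have hany' : ms.any pvIsUser = true := by
            rw [← pvExists_iff_any ms, ← pvFindLast_nonneg_iff ms _ h0, ← hk]; omega
          have hkmem : -1 < k ∧ k ≤ (ms.length : Int) - 1 := by
            rcases pvFindLast_mem ms (PySem.List.pyRange ((ms.length : Int) - 1) (-1) (-1)) with h | h
            · rw [← hk] at h; omega
            · rw [← hk] at h; exact (PySem.List.mem_pyRange_neg_one).mp h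
          have hkt : (k + 1).toNat = k.toNat + 1 := by omega
          have hktle : k.toNat + 1 ≤ ms.length := by omega
          have hsliceApp : PySem.List.slice (ms ++ [m]) (some (k + 1)) none
              = ms.drop (k.toNat + 1) ++ [m] := by
            rw [PySem.List.slice_from (ms ++ [m]) (by omega), hkt]
            exact List.drop_append_of_le_length hktle
          have hslice : PySem.List.slice ms (some (k + 1)) none = ms.drop (k.toNat + 1) := by
            rw [PySem.List.slice_from ms (by omega), hkt]
          have hL : has_tool_result_after_latest_user_py (ms ++ [m]) tool_name
              = (pvAAny tool_name (ms.drop (k.toNat + 1)) || pvTM tool_name m) := by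
            simp only [has_tool_result_after_latest_user_py, hempty, Bool.false_eq_true, if_false,
              hlen, hfl]
            rw [if_neg hkneg, hsliceApp, pvAAny_append]
          have hAms : has_tool_result_after_latest_user_py ms tool_name
              = pvAAny tool_name (ms.drop (k.toNat + 1)) := by
            rcases ms with _ | ⟨x, xs⟩
            · simp at hkmem; omega
            · rw [pvA_unfold, if_neg (hk ▸ hkneg), ← hk, hslice]
          rw [hL, hAms, hany']
          simp
      rw [hAapp, hany, pvBStep, if_neg hulit]
      by_cases hc : (ms.any pvIsUser && (pvGet m "role" == some "tool")
          && (pvGet m "name" == some tool_name)) = true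
      · rw [if_pos hc]
        have hc' : (ms.any pvIsUser && pvTM tool_name m) = true := by
          rw [pvTM, ← Bool.and_assoc]; exact hc
        rw [hc', Bool.or_true]
      · rw [if_neg hc]
        have hc' : (ms.any pvIsUser && pvTM tool_name m) = false := by
          rw [pvTM, ← Bool.and_assoc]
          exact Bool.not_eq_true _ ▸ hc
        rw [hc', Bool.or_false]

-- ===== VERDICT (by name: the statement is the Claim_ definition above) =====
theorem has_tool_result_after_latest_user_py_spec : Claim_equal_has_tool_result_after_latest_user_py := by
  intro messages tool_name _
  show _ = _
  rw [has_tool_result_after_latest_user_py_alt, pvMain]
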